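-- pv_equiv track=rewrite | github.com/mrobberto/samos-pipeline | pipeline/step10_telluric/step10b_apply_telluric.py | pick_flux_column
-- ===== SOURCE A (Python) =====
-- def pick_flux_column(cols):
--     cols_u = {c.upper(): c for c in cols}
--     preferred = [
--         "STELLAR",          # canonical Step09 merged science column
--         "OBJ_SKYSUB",
--         "OBJ_RAW",
--         "FLUX_ADU_S",
--         "FLUX",
--         "FLUX_APCORR",
--     ]
--     for key in preferred:
--         if key in cols_u:
--             return cols_u[key]
--     return None
-- ===== SOURCE B (Python) =====
-- _PRIORITY = {
--     "STELLAR": 0,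
--     "OBJ_SKYSUB": 1,
--     "OBJ_RAW": 2,
--     "FLUX_ADU_S": 3,
--     "FLUX": 4,
--     "FLUX_APCORR": 5,
-- }
--
--
-- def pick_flux_column(cols):
--     best = None  # (rank, column)
--     for c in cols:
--         r = _PRIORITY.get(c.upper())
--         if r is not None and (best is None or r <= best[0]):
--             best = (r, c)
--     return best[1] if best is not None else None
-- ===== Notes on version B (the rewrite author's own statement) =====
-- stated objective: alternative
-- what changed: Instead of building an uppercase->column dict and then probing it key by key in preference order, B makes a single pass over the columns keeping the best-ranked (lowest priority index, last wins on ties) column via a fixed name->rank table.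
import Mathlib
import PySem

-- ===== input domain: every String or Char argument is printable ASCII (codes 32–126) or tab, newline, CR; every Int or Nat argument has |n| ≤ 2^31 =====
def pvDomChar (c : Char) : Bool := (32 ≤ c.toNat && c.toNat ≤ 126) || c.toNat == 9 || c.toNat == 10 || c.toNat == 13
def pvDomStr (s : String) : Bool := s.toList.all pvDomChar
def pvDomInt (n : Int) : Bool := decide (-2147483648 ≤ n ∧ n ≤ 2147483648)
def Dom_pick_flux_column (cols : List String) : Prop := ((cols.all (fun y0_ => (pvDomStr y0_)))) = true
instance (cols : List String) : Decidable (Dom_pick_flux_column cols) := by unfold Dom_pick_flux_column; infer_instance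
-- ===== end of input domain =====

-- B replaces A's build-dict-then-probe-keys with one pass over the columns keeping the
-- best-ranked (lowest rank, last wins on ties) column via a fixed name->rank table
-- (objective: alternative).

-- ===== PORT A =====
-- the fixed preferred list of A
def pfcPreferred : List String :=
  ["STELLAR", "OBJ_SKYSUB", "OBJ_RAW", "FLUX_ADU_S", "FLUX", "FLUX_APCORR"]

-- 'for key in preferred: if key in cols_u: return cols_u[key]'
def pfcLookupLoop (d : PySem.Dict String String) : List String → Option String
  | [] => none
  | k :: ks => if d.contains k then d.get? k else pfcLookupLoop d ks

def pick_flux_column (cols : List String) : Option String :=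
  let cols_u : PySem.Dict String String :=
    cols.foldl (fun d c => d.insert (PySem.Str.upper c) c) PySem.Dict.empty
  pfcLookupLoop cols_u pfcPreferred

-- ===== PORT B =====
-- the fixed _PRIORITY table of B
def pfcPriority : PySem.Dict String Nat :=
  PySem.Dict.ofList [("STELLAR", 0), ("OBJ_SKYSUB", 1), ("OBJ_RAW", 2),
                     ("FLUX_ADU_S", 3), ("FLUX", 4), ("FLUX_APCORR", 5)]

-- one step of B's loop body
def pfcStep (best : Option (Nat × String)) (c : String) : Option (Nat × String) :=
  match pfcPriority.get? (PySem.Str.upper c) with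
  | some r =>
    match best with
    | none => some (r, c)
    | some (br, _) => if r ≤ br then some (r, c) else best
  | none => best

def pick_flux_column_alt (cols : List String) : Option String :=
  match cols.foldl pfcStep none with
  | some (_, b) => some b
  | none => none

-- ===== PRECONDITION & SPEC =====
def Spec_pick_flux_column (cols : List String) (out : Option String) : Prop := out = pick_flux_column_alt cols
instance (cols : List String) (out : Option String) : Decidable (Spec_pick_flux_column cols out) := by unfold Spec_pick_flux_column; infer_instance

-- ===== CLAIM (what is proved, stated in full; the proofs are below) =====
def Claim_equal_pick_flux_column : Prop := ∀ (cols : List String), Dom_pick_flux_column cols → Spec_pick_flux_column cols (pick_flux_column cols)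

-- ===== LEMMAS AND PROOFS =====

-- last c in cols with c.upper() == key (proof-only intermediate describing A's dict entries)
def pfcLastMatch (key : String) (cols : List String) : Option String :=
  cols.foldl (fun best c => if PySem.Str.upper c == key then some c else best) none

-- A's probe loop expressed through pfcLastMatch (proof-only intermediate)
def pfcScanLoop (cols : List String) : List String → Option String
  | [] => none
  | k :: ks =>
    match pfcLastMatch k cols with
    | some best => some best
    | none => pfcScanLoop cols ks

-- generic rank of x in a key list (first index)
def pfcIdx : List String → String → Option Nat
  | [], _ => none
  | k :: ks, x => if x = k then some 0 else (pfcIdx ks x).map (· + 1)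

-- B's loop body generalized over the rank function
def pfcStepG (ρ : String → Option Nat) (best : Option (Nat × String)) (c : String) :
    Option (Nat × String) :=
  match ρ (PySem.Str.upper c) with
  | some r =>
    match best with
    | none => some (r, c)
    | some (br, _) => if r ≤ br then some (r, c) else best
  | none => best

-- the priority table answers exactly the rank in the preferred list
theorem pfc_priority_eq_idx (x : String) :
    pfcPriority.get? x = pfcIdx pfcPreferred x := by
  have h : pfcPriority = PySem.Dict.mk [("STELLAR", 0), ("OBJ_SKYSUB", 1), ("OBJ_RAW", 2),
      ("FLUX_ADU_S", 3), ("FLUX", 4), ("FLUX_APCORR", 5)] := by decide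
  rw [h]
  simp only [PySem.Dict.get?_mk_cons, beq_iff_eq, pfcIdx, pfcPreferred]
  by_cases h1 : x = "STELLAR" <;> by_cases h2 : x = "OBJ_SKYSUB" <;> by_cases h3 : x = "OBJ_RAW" <;>
    by_cases h4 : x = "FLUX_ADU_S" <;> by_cases h5 : x = "FLUX" <;> by_cases h6 : x = "FLUX_APCORR" <;>
      simp [PySem.Dict.get?, h1, h2, h3, h4, h5, h6, eq_comm]

theorem pfc_step_eq (best : Option (Nat × String)) (c : String) :
    pfcStep best c = pfcStepG (pfcIdx pfcPreferred) best c := by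
  unfold pfcStep pfcStepG
  rw [pfc_priority_eq_idx]

-- the dict built by A answers each key with the last case-insensitive match
theorem pfc_get_eq_lastMatch (cols : List String) (d : PySem.Dict String String) (key : String) :
    (cols.foldl (fun d c => d.insert (PySem.Str.upper c) c) d).get? key
      = cols.foldl (fun best c => if PySem.Str.upper c == key then some c else best) (d.get? key) := by
  induction cols generalizing d with
  | nil => rfl
  | cons c cs ih =>
    simp only [List.foldl_cons, ih]
    congr 1
    rw [PySem.Dict.get?_insert]
    by_cases h : PySem.Str.upper c = key
    · simp [h]
    · simp [h, Ne.symm h]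

theorem pfc_get_eq_lastMatch' (cols : List String) (key : String) :
    (cols.foldl (fun d c => d.insert (PySem.Str.upper c) c) PySem.Dict.empty).get? key
      = pfcLastMatch key cols := by
  rw [pfc_get_eq_lastMatch, PySem.Dict.get?_empty]; rfl

-- A = scanLoop
theorem pfc_A_eq_scan (cols : List String) (keys : List String) :
    pfcLookupLoop (cols.foldl (fun d c => d.insert (PySem.Str.upper c) c) PySem.Dict.empty) keys
      = pfcScanLoop cols keys := by
  induction keys with
  | nil => rfl
  | cons k ks ih =>
    simp only [pfcLookupLoop, pfcScanLoop, ih, PySem.Dict.contains_eq_isSome_get?,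
      pfc_get_eq_lastMatch']
    cases pfcLastMatch k cols <;> simp

-- peel one column off a lastMatch fold
theorem pfc_lastMatch_fold (key : String) (cols : List String)
    (acc : Option String) :
    cols.foldl (fun best c => if PySem.Str.upper c == key then some c else best) acc
      = match pfcLastMatch key cols with
        | some b => some b
        | none => acc := by
  induction cols generalizing acc with
  | nil => rfl
  | cons c cs ih =>
    have h2 : pfcLastMatch key (c :: cs)
        = match pfcLastMatch key cs with
          | some b => some b
          | none => if PySem.Str.upper c == key then some c else none := ih _
    simp only [List.foldl_cons]
    rw [ih, h2]
    cases hl : pfcLastMatch key cs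
    · simp only
      by_cases hu : PySem.Str.upper c == key <;> simp [hu]
    · rfl

theorem pfc_lastMatch_cons (key c : String) (cs : List String) :
    pfcLastMatch key (c :: cs)
      = match pfcLastMatch key cs with
        | some b => some b
        | none => if PySem.Str.upper c == key then some c else none := by
  unfold pfcLastMatch
  simp only [List.foldl_cons]
  rw [pfc_lastMatch_fold]
  rfl

theorem pfc_lastMatch_none (key : String) (cols : List String)
    (h : pfcLastMatch key cols = none) :
    ∀ c ∈ cols, PySem.Str.upper c ≠ key := by
  induction cols with
  | nil => intro c hc; cases hc
  | cons c cs ih =>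
    rw [pfc_lastMatch_cons] at h
    rcases hcs : pfcLastMatch key cs with _ | b
    · rw [hcs] at h
      simp only at h
      intro x hx
      rcases List.mem_cons.mp hx with hx | hx
      · subst hx
        intro hu
        simp [hu] at h
      · exact ih hcs x hx
    · rw [hcs] at h; simp at h

-- a rank-0 element keeps dominating if no further key-matches appear
theorem pfc_fold_keep_zero (k : String) (ks : List String) (cs : List String) (b : String)
    (h : ∀ c ∈ cs, PySem.Str.upper c ≠ k) :
    cs.foldl (pfcStepG (pfcIdx (k :: ks))) (some (0, b)) = some (0, b) := by
  induction cs with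
  | nil => rfl
  | cons c cs ih =>
    have hc : PySem.Str.upper c ≠ k := h c (List.mem_cons_self ..)
    simp only [List.foldl_cons]
    have hidx : pfcIdx (k :: ks) (PySem.Str.upper c)
        = (pfcIdx ks (PySem.Str.upper c)).map (· + 1) := by simp [pfcIdx, hc]
    have hstep : pfcStepG (pfcIdx (k :: ks)) (some (0, b)) c = some (0, b) := by
      unfold pfcStepG
      rw [hidx]
      rcases pfcIdx ks (PySem.Str.upper c) with _ | r
      · rfl
      · simp only [Option.map_some]
        rw [if_neg (by omega)]
    rw [hstep]
    exact ih (fun x hx => h x (List.mem_cons_of_mem _ hx))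

-- if key k has a last match b, B's fold lands on (0, b)
theorem pfc_fold_of_match (k : String) (ks : List String) (cols : List String) (b : String)
    (h : pfcLastMatch k cols = some b) (acc : Option (Nat × String)) :
    cols.foldl (pfcStepG (pfcIdx (k :: ks))) acc = some (0, b) := by
  induction cols generalizing acc with
  | nil => simp [pfcLastMatch] at h
  | cons c cs ih =>
    rw [pfc_lastMatch_cons] at h
    simp only [List.foldl_cons]
    rcases hcs : pfcLastMatch k cs with _ | b'
    · rw [hcs] at h
      simp only at h
      by_cases hu : PySem.Str.upper c == k
      · rw [if_pos hu] at h
        have hb : c = b := by injection h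
        subst hb
        have hk : PySem.Str.upper c = k := by exact eq_of_beq hu
        have hidx : pfcIdx (k :: ks) (PySem.Str.upper c) = some 0 := by
          simp [pfcIdx, hk]
        have hstep : pfcStepG (pfcIdx (k :: ks)) acc c = some (0, c) := by
          unfold pfcStepG
          rw [hidx]
          rcases acc with _ | ⟨br, y⟩
          · rfl
          · simp
        rw [hstep]
        exact pfc_fold_keep_zero k ks cs c (pfc_lastMatch_none k cs hcs)
      · rw [if_neg hu] at h; cases h
    · rw [hcs] at h
      have hb : b' = b := by injection h
      subst hb
      exact ih hcs _

-- if nothing matches k, ranking over (k :: ks) is ranking over ks shifted by one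
theorem pfc_fold_shift (k : String) (ks : List String) (cols : List String)
    (h : ∀ c ∈ cols, PySem.Str.upper c ≠ k) (acc : Option (Nat × String)) :
    cols.foldl (pfcStepG (pfcIdx (k :: ks))) (acc.map (fun p => (p.1 + 1, p.2)))
      = (cols.foldl (pfcStepG (pfcIdx ks)) acc).map (fun p => (p.1 + 1, p.2)) := by
  induction cols generalizing acc with
  | nil => rfl
  | cons c cs ih =>
    have hc : PySem.Str.upper c ≠ k := h c (List.mem_cons_self ..)
    simp only [List.foldl_cons]
    have hidx : pfcIdx (k :: ks) (PySem.Str.upper c)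
        = (pfcIdx ks (PySem.Str.upper c)).map (· + 1) := by simp [pfcIdx, hc]
    have hstep : pfcStepG (pfcIdx (k :: ks)) (acc.map (fun p => (p.1 + 1, p.2))) c
        = (pfcStepG (pfcIdx ks) acc c).map (fun p => (p.1 + 1, p.2)) := by
      unfold pfcStepG
      rw [hidx]
      rcases pfcIdx ks (PySem.Str.upper c) with _ | r
      · rfl
      · simp only [Option.map_some]
        rcases acc with _ | ⟨br, y⟩
        · rfl
        · simp only [Option.map_some]
          by_cases hle : r ≤ br
          · rw [if_pos hle, if_pos (by omega)]
            rfl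
          · rw [if_neg hle, if_neg (by omega)]
            rfl
    rw [hstep]
    exact ih (fun x hx => h x (List.mem_cons_of_mem _ hx)) _

-- with the empty key list nothing ever ranks
theorem pfc_fold_nil (cols : List String) (acc : Option (Nat × String)) :
    cols.foldl (pfcStepG (pfcIdx [])) acc = acc := by
  induction cols generalizing acc with
  | nil => rfl
  | cons c cs ih =>
    simp only [List.foldl_cons]
    have : pfcStepG (pfcIdx []) acc c = acc := by unfold pfcStepG pfcIdx; rfl
    rw [this, ih]

-- main bridge: A's probe loop equals B's single fold, for any key list
theorem pfc_scan_eq_fold (keys : List String) (cols : List String) :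
    pfcScanLoop cols keys
      = (cols.foldl (pfcStepG (pfcIdx keys)) none).map Prod.snd := by
  induction keys with
  | nil => rw [pfc_fold_nil]; rfl
  | cons k ks ih =>
    unfold pfcScanLoop
    rcases h : pfcLastMatch k cols with _ | b
    · have hsh := pfc_fold_shift k ks cols (pfc_lastMatch_none k cols h) none
      simp only [Option.map_none] at hsh
      rw [hsh, ih]
      cases cols.foldl (pfcStepG (pfcIdx ks)) none <;> rfl
    · rw [pfc_fold_of_match k ks cols b h none]
      rfl

-- ===== VERDICT (by name: the statement is the Claim_ definition above) =====
theorem pick_flux_column_spec : Claim_equal_pick_flux_column := by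
  intro cols _
  unfold Spec_pick_flux_column pick_flux_column pick_flux_column_alt
  rw [pfc_A_eq_scan, pfc_scan_eq_fold]
  have hstep : cols.foldl pfcStep none = cols.foldl (pfcStepG (pfcIdx pfcPreferred)) none := by
    exact List.foldl_ext _ _ none (fun b a _ => pfc_step_eq b a)
  rw [hstep]
  cases cols.foldl (pfcStepG (pfcIdx pfcPreferred)) none <;> rfl
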